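-- pv_equiv track=rewrite | github.com/URN/hstp | audioboom/utils.py | make_slug
-- ===== SOURCE A (Python) =====
-- def make_slug(title):
--     long = ''.join([
--         s if s in '0123456789-abcdefghijklmnopqrstuvwxyz'
--         else '-'
--         for s in title.lower().strip()
--         ])
--     xs = [x for x in long.split("-") if not short_word(x)]
--
--     return "-".join(xs)
--
-- def short_word(w):
--     return w in [
--         "", "the", "a"
--     ]
-- ===== SOURCE B (Python) =====
-- def make_slug(title):
--     # Single-pass tokenizer: no intermediate hyphen-substituted string, no split.
--     words = []
--     buf = []
--     for c in title.lower().strip():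
--         if c in '0123456789abcdefghijklmnopqrstuvwxyz':
--             buf.append(c)
--         else:
--             words.append(''.join(buf))
--             buf = []
--     words.append(''.join(buf))
--     return '-'.join(w for w in words if w not in ('', 'the', 'a'))
-- ===== Notes on version B (the rewrite author's own statement) =====
-- stated objective: alternative
-- what changed: B replaces A's build-a-hyphen-substituted-copy-then-split pipeline with a single-pass character tokenizer that flushes a word buffer at each non-alphanumeric character and filters stopwords from the collected words.
import Mathlib
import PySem

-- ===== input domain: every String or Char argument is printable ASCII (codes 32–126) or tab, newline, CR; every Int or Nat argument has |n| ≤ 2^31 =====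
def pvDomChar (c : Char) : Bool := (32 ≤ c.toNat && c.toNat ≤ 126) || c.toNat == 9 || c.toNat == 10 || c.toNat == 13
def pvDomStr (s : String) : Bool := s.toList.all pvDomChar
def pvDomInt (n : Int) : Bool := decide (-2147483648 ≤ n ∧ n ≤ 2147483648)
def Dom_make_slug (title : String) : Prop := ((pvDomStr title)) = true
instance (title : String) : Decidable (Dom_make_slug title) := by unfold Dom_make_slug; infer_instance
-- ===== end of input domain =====

-- B builds the slug in one pass over the characters (buffer + word list) instead of
-- A's substitute-to-hyphens copy followed by split; same cost, different shape.

-- ===== PORT A =====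
-- helper short_word: w in ["", "the", "a"]
def short_word (w : List Char) : Bool :=
  [([] : List Char), "the".toList, "a".toList].contains w

def make_slug (title : String) : String :=
  let long : List Char :=
    (PySem.Chars.strip (PySem.Chars.lower title.toList)).map
      (fun s => if ("0123456789-abcdefghijklmnopqrstuvwxyz".toList).contains s then s else '-')
  let xs := (PySem.Chars.splitOn long ['-']).filter (fun x => !short_word x)
  String.ofList (PySem.Chars.join ['-'] xs)

-- ===== PORT B =====
def msWordChar (c : Char) : Bool := ("0123456789abcdefghijklmnopqrstuvwxyz".toList).contains c

def msStop (w : List Char) : Bool := w == [] || w == "the".toList || w == "a".toList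

def make_slug_alt (title : String) : String :=
  let st := (PySem.Chars.strip (PySem.Chars.lower title.toList)).foldl
      (fun (p : List (List Char) × List Char) c =>
        if msWordChar c then (p.1, p.2 ++ [c]) else (p.1 ++ [p.2], []))
      ([], [])
  let words := st.1 ++ [st.2]
  String.ofList (PySem.Chars.join ['-'] (words.filter (fun w => !msStop w)))

-- ===== PRECONDITION & SPEC =====
def Spec_make_slug (title : String) (out : String) : Prop := out = make_slug_alt title
instance (title : String) (out : String) : Decidable (Spec_make_slug title out) := by unfold Spec_make_slug; infer_instance

-- ===== CLAIM (what is proved, stated in full; the proofs are below) =====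
def Claim_equal_make_slug : Prop := ∀ (title : String), Dom_make_slug title → Spec_make_slug title (make_slug title)

-- ===== LEMMAS AND PROOFS =====

-- Reference tokenizer: split the list at '-' characters, buffer carried forward.
def msTok : List Char → List Char → List (List Char)
  | [], cur => [cur]
  | c :: rest, cur => if c = '-' then cur :: msTok rest [] else msTok rest (cur ++ [c])

lemma splitOn_go_dash (fuel : Nat) :
    ∀ (l cur : List Char) (acc : List (List Char)), l.length < fuel →
      PySem.Chars.splitOn.go ['-'] fuel l cur acc = acc.reverse ++ msTok l cur.reverse := by
  induction fuel with
  | zero => intro l cur acc h; omega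
  | succ n ih =>
    intro l cur acc h
    cases l with
    | nil => simp [PySem.Chars.splitOn.go, msTok]
    | cons c rest =>
      by_cases hc : c = '-'
      · subst hc
        have : PySem.Chars.splitOn.go ['-'] (n+1) ('-' :: rest) cur acc
            = PySem.Chars.splitOn.go ['-'] n rest [] (cur.reverse :: acc) := by
          simp [PySem.Chars.splitOn.go, List.isPrefixOf]
        rw [this, ih rest [] (cur.reverse :: acc) (by simp at h; omega)]
        simp [msTok]
      · have : PySem.Chars.splitOn.go ['-'] (n+1) (c :: rest) cur acc
            = PySem.Chars.splitOn.go ['-'] n rest (c :: cur) acc := by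
          simp [PySem.Chars.splitOn.go, List.isPrefixOf, (Ne.symm hc)]
        rw [this, ih rest (c :: cur) acc (by simp at h; omega)]
        simp [msTok, hc]

lemma splitOn_dash (l : List Char) :
    PySem.Chars.splitOn l ['-'] = msTok l [] := by
  have := splitOn_go_dash (l.length + 1) l [] [] (by omega)
  simpa [PySem.Chars.splitOn] using this

-- A's replacement character agrees with B's word-character test.
lemma subst_char (c : Char) :
    (if ("0123456789-abcdefghijklmnopqrstuvwxyz".toList).contains c then c else '-')
      = (if msWordChar c then c else '-') := by
  by_cases hd : c = '-'
  · subst hd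
    have h1 : ("0123456789-abcdefghijklmnopqrstuvwxyz".toList).contains '-' = true := by decide
    have h2 : msWordChar '-' = false := by decide
    simp [h2]
  · have key : ("0123456789-abcdefghijklmnopqrstuvwxyz".toList).contains c = msWordChar c := by
      have hsplit : "0123456789-abcdefghijklmnopqrstuvwxyz".toList
          = "0123456789".toList ++ '-' :: "abcdefghijklmnopqrstuvwxyz".toList := by decide
      have hword : "0123456789abcdefghijklmnopqrstuvwxyz".toList
          = "0123456789".toList ++ "abcdefghijklmnopqrstuvwxyz".toList := by decide
      rw [hsplit]; unfold msWordChar; rw [hword]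
      simp [hd]
    rw [key]

-- B's fold over cs produces exactly the msTok tokens of the substituted string.
lemma fold_tok (cs : List Char) :
    ∀ (ws : List (List Char)) (buf : List Char),
      (cs.foldl (fun (p : List (List Char) × List Char) c =>
          if msWordChar c then (p.1, p.2 ++ [c]) else (p.1 ++ [p.2], [])) (ws, buf)).1
        ++ [(cs.foldl (fun (p : List (List Char) × List Char) c =>
          if msWordChar c then (p.1, p.2 ++ [c]) else (p.1 ++ [p.2], [])) (ws, buf)).2]
      = ws ++ msTok (cs.map (fun c => if msWordChar c then c else '-')) buf := by
  induction cs with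
  | nil => intro ws buf; simp [msTok]
  | cons c rest ih =>
    intro ws buf
    by_cases hw : msWordChar c = true
    · have hcd : c ≠ '-' := by
        intro h; rw [h] at hw; exact absurd hw (by decide)
      simp only [List.foldl_cons, List.map_cons, hw, if_true, msTok, hcd, if_false]
      exact ih ws (buf ++ [c])
    · simp only [Bool.not_eq_true] at hw
      simp only [List.foldl_cons, List.map_cons, hw, Bool.false_eq_true, if_false, msTok]
      rw [ih (ws ++ [buf]) []]
      simp

-- the two stopword filters agree
lemma filter_agree (x : List Char) : short_word x = msStop x := by
  simp only [short_word, msStop, List.contains_cons, List.contains_nil]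
  simp [Bool.or_assoc]

-- ===== VERDICT (by name: the statement is the Claim_ definition above) =====
theorem make_slug_spec : Claim_equal_make_slug := by
  intro title _
  unfold Spec_make_slug make_slug make_slug_alt
  set cs := PySem.Chars.strip (PySem.Chars.lower title.toList) with hcs
  have hmap : cs.map (fun s => if ("0123456789-abcdefghijklmnopqrstuvwxyz".toList).contains s then s else '-')
      = cs.map (fun c => if msWordChar c then c else '-') :=
    List.map_congr_left (fun c _ => subst_char c)
  have hfold := fold_tok cs [] []
  simp only [List.nil_append] at hfold
  simp only [hmap, splitOn_dash, ← hfold]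
  congr 2
  exact List.filter_congr (fun x _ => by rw [filter_agree])
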